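-- pv_equiv track=rewrite | github.com/Kapok-uii/worker-allocation | worker-assign/DGWO/src/seek_critical_node.py | convert_jsp_result_to_edges
-- ===== SOURCE A (Python) =====
-- def convert_jsp_result_to_edges(node_machine, machine_num):
--     all_machine_edge = []
--
--     for j in range(machine_num):
--         machine_edge = [tasks for tasks in node_machine if tasks[2] == j]
--         machine_edge.sort(key=lambda x: x[3])
--         for ith in range(len(machine_edge) - 1):
--             all_machine_edge.append((machine_edge[ith][0], machine_edge[ith + 1][0], machine_edge[ith][1]))
--
--     return all_machine_edge
-- ===== SOURCE B (Python) =====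
-- def convert_jsp_result_to_edges(node_machine, machine_num):
--     if machine_num <= 0:
--         return []
--     buckets = [[] for _ in range(machine_num)]
--     for t in node_machine:
--         m = t[2]
--         if 0 <= m < machine_num:
--             buckets[m].append(t)
--     edges = []
--     for b in buckets:
--         b.sort(key=lambda x: x[3])
--         edges.extend((u[0], v[0], u[1]) for u, v in zip(b, b[1:]))
--     return edges
-- ===== Notes on version B (the rewrite author's own statement) =====
-- stated objective: faster
-- what changed: Instead of re-scanning and re-filtering the whole task list once per machine (machine_num passes), B distributes the tasks into per-machine buckets in a single pass and then sorts each bucket and emits its consecutive pairs.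
import Mathlib
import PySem

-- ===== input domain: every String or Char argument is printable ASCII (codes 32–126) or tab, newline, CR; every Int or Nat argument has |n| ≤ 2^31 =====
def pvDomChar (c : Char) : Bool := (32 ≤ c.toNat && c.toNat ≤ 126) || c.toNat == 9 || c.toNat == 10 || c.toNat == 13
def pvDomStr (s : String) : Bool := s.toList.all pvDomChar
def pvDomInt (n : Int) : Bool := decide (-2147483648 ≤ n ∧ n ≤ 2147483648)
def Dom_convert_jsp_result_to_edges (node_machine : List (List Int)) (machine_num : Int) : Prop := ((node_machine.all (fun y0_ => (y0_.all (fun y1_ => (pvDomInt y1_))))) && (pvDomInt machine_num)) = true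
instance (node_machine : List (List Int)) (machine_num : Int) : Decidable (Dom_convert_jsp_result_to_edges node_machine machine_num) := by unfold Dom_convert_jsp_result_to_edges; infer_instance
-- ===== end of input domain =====

-- B buckets the tasks by machine index in ONE pass over node_machine instead of re-scanning the
-- whole task list once per machine; objective: faster by that asymptotic mechanism.

-- ===== PORT A =====
def convert_jsp_result_to_edges (node_machine : List (List Int)) (machine_num : Int) : List (Int × Int × Int) :=
  (PySem.List.pyRange 0 machine_num 1).foldl (fun all_machine_edge j =>
    let machine_edge := node_machine.filter (fun tasks => PySem.List.pyGetD tasks 2 0 == j)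
    let machine_edge := PySem.List.sorted machine_edge (fun x => PySem.List.pyGetD x 3 0) false
    (PySem.List.pyRange 0 ((machine_edge.length : Int) - 1) 1).foldl (fun acc ith =>
      acc ++ [(PySem.List.pyGetD (PySem.List.pyGetD machine_edge ith []) 0 0,
               PySem.List.pyGetD (PySem.List.pyGetD machine_edge (ith + 1) []) 0 0,
               PySem.List.pyGetD (PySem.List.pyGetD machine_edge ith []) 1 0)]) all_machine_edge) []

-- ===== PORT B =====
def convert_jsp_result_to_edges_alt (node_machine : List (List Int)) (machine_num : Int) : List (Int × Int × Int) :=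
  if machine_num ≤ 0 then []
  else
    let buckets := node_machine.foldl (fun bs t =>
      let m := PySem.List.pyGetD t 2 0
      if 0 ≤ m ∧ m < machine_num then bs.set m.toNat (bs.getD m.toNat [] ++ [t]) else bs)
      (List.replicate machine_num.toNat ([] : List (List Int)))
    buckets.foldl (fun edges b =>
      let sb := PySem.List.sorted b (fun x => PySem.List.pyGetD x 3 0) false
      edges ++ (sb.zip sb.tail).map (fun uv =>
        (PySem.List.pyGetD uv.1 0 0, PySem.List.pyGetD uv.2 0 0, PySem.List.pyGetD uv.1 1 0))) []

-- ===== PRECONDITION & SPEC =====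
-- Pre_ excludes exactly the inputs where Python A raises IndexError: with machine_num ≥ 1 every
-- row is indexed at [2] (needs length ≥ 3), and rows whose machine index lies in
-- [0, machine_num) are sorted by key row[3] (need length ≥ 4).
def Pre_convert_jsp_result_to_edges (node_machine : List (List Int)) (machine_num : Int) : Prop :=
  machine_num ≤ 0 ∨ ∀ t ∈ node_machine, 3 ≤ t.length ∧
    ((0 ≤ t.getD 2 0 ∧ t.getD 2 0 < machine_num) → 4 ≤ t.length)
instance (node_machine : List (List Int)) (machine_num : Int) : Decidable (Pre_convert_jsp_result_to_edges node_machine machine_num) := by unfold Pre_convert_jsp_result_to_edges; infer_instance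

def pvWitness_convert_jsp_result_to_edges : List (List Int) × Int := ([[1, 2, 0, 5], [3, 4, 0, 1]], 1)

def Spec_convert_jsp_result_to_edges (node_machine : List (List Int)) (machine_num : Int) (out : List (Int × Int × Int)) : Prop := out = convert_jsp_result_to_edges_alt node_machine machine_num
instance (node_machine : List (List Int)) (machine_num : Int) (out : List (Int × Int × Int)) : Decidable (Spec_convert_jsp_result_to_edges node_machine machine_num out) := by unfold Spec_convert_jsp_result_to_edges; infer_instance

-- ===== CLAIM (what is proved, stated in full; the proofs are below) =====
def Claim_equal_convert_jsp_result_to_edges : Prop := ∀ (node_machine : List (List Int)) (machine_num : Int), Dom_convert_jsp_result_to_edges node_machine machine_num → Pre_convert_jsp_result_to_edges node_machine machine_num → Spec_convert_jsp_result_to_edges node_machine machine_num (convert_jsp_result_to_edges node_machine machine_num)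

-- ===== LEMMAS AND PROOFS =====

-- the consecutive-pairs block in Nat-indexed range form equals the zip form
theorem pv_block_getD {γ : Type} (g : List Int → List Int → γ) (me : List (List Int)) :
    (List.range (me.length - 1)).map (fun k : Nat => g (me.getD k []) (me.getD (k+1) []))
    = (me.zip me.tail).map (fun uv => g uv.1 uv.2) := by
  induction me with
  | nil => simp
  | cons u rest ih =>
    cases rest with
    | nil => simp
    | cons v rest' =>
      have hlen : (u :: v :: rest').length - 1 = ((v :: rest').length - 1) + 1 := by simp
      rw [hlen, List.range_succ_eq_map, List.map_cons, List.map_map]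
      simp only [Function.comp_def, List.getD_cons_succ, List.getD_cons_zero]
      simp only [List.getD_cons_succ, List.tail_cons] at ih
      simp only [List.tail_cons, List.zip_cons_cons, List.map_cons]
      rw [ih]

theorem pvGD (xs : List (List Int)) (k : Nat) (d : List Int) :
    PySem.List.pyGetD xs ((k : Int) + 1) d = xs.getD (k + 1) d := by
  have h : ((k : Int) + 1) = ((k + 1 : Nat) : Int) := by push_cast; ring
  rw [h, PySem.List.pyGetD_natCast]

-- A's Int-indexed pyRange block reduced to the zip form B uses
theorem pv_block_eq (me : List (List Int)) :
    (PySem.List.pyRange 0 ((me.length : Int) - 1) 1).map (fun ith =>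
      (PySem.List.pyGetD (PySem.List.pyGetD me ith []) 0 0,
       PySem.List.pyGetD (PySem.List.pyGetD me (ith + 1) []) 0 0,
       PySem.List.pyGetD (PySem.List.pyGetD me ith []) 1 0))
    = (me.zip me.tail).map (fun uv =>
      (PySem.List.pyGetD uv.1 0 0, PySem.List.pyGetD uv.2 0 0, PySem.List.pyGetD uv.1 1 0)) := by
  rw [PySem.List.pyRange_one]
  have h : (((me.length : Int) - 1) - 0).toNat = me.length - 1 := by omega
  rw [h, List.map_map]
  have hfun : ((fun ith : Int =>
      (PySem.List.pyGetD (PySem.List.pyGetD me ith []) 0 0,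
       PySem.List.pyGetD (PySem.List.pyGetD me (ith + 1) []) 0 0,
       PySem.List.pyGetD (PySem.List.pyGetD me ith []) 1 0)) ∘ (fun k : Nat => (0 : Int) + (k : Int)))
      = (fun k : Nat =>
        (fun u v : List Int => (PySem.List.pyGetD u 0 0, PySem.List.pyGetD v 0 0, PySem.List.pyGetD u 1 0))
          (me.getD k []) (me.getD (k+1) [])) := by
    funext k
    simp only [Function.comp_def, zero_add, pvGD, PySem.List.pyGetD_natCast]
  rw [hfun]
  exact pv_block_getD (fun u v : List Int => (PySem.List.pyGetD u 0 0, PySem.List.pyGetD v 0 0, PySem.List.pyGetD u 1 0)) me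

theorem pv_set_map_range {β : Type} (f : Nat → β) (n m : Nat) (v : β) :
    ((List.range n).map f).set m v = (List.range n).map (fun k => if k = m then v else f k) := by
  apply List.ext_getElem
  · simp
  intro i h1 h2
  simp only [List.getElem_set, List.getElem_map, List.getElem_range]
  by_cases h : i = m
  · simp [h]
  · simp [h, Ne.symm h]

-- B's one-pass bucket fold computes, for each machine k, exactly A's filter pass
theorem pv_buckets_eq (mn : Int) (xs : List (List Int)) :
    xs.foldl (fun bs t =>
      let m := PySem.List.pyGetD t 2 0
      if 0 ≤ m ∧ m < mn then bs.set m.toNat (bs.getD m.toNat [] ++ [t]) else bs)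
      (List.replicate mn.toNat ([] : List (List Int)))
    = (List.range mn.toNat).map (fun k : Nat =>
        xs.filter (fun t => PySem.List.pyGetD t 2 0 == (k : Int))) := by
  induction xs using List.reverseRecOn with
  | nil => simp [List.map_const']
  | append_singleton ys t ih =>
    rw [List.foldl_append, List.foldl_cons, List.foldl_nil, ih]
    show (if 0 ≤ PySem.List.pyGetD t 2 0 ∧ PySem.List.pyGetD t 2 0 < mn
        then ((List.range mn.toNat).map (fun k : Nat => ys.filter (fun t => PySem.List.pyGetD t 2 0 == (k : Int)))).set (PySem.List.pyGetD t 2 0).toNat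
               (((List.range mn.toNat).map (fun k : Nat => ys.filter (fun t => PySem.List.pyGetD t 2 0 == (k : Int)))).getD (PySem.List.pyGetD t 2 0).toNat [] ++ [t])
        else (List.range mn.toNat).map (fun k : Nat => ys.filter (fun t => PySem.List.pyGetD t 2 0 == (k : Int)))) = _
    by_cases hc : 0 ≤ PySem.List.pyGetD t 2 0 ∧ PySem.List.pyGetD t 2 0 < mn
    · rw [if_pos hc]
      have hmn : (PySem.List.pyGetD t 2 0).toNat < mn.toNat := by omega
      rw [PySem.List.getD_map_range (fun k : Nat => ys.filter (fun t => PySem.List.pyGetD t 2 0 == (k : Int))) mn.toNat (PySem.List.pyGetD t 2 0).toNat [] hmn,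
          pv_set_map_range]
      refine List.map_congr_left ?_
      intro k hk
      simp only [List.mem_range] at hk
      simp only [List.filter_append, List.filter_cons, List.filter_nil]
      by_cases hk2 : k = (PySem.List.pyGetD t 2 0).toNat
      · have hm : ((k : Nat) : Int) = PySem.List.pyGetD t 2 0 := by omega
        have h2 : (((PySem.List.pyGetD t 2 0).toNat : Nat) : Int) = ((k : Nat) : Int) := by omega
        rw [if_pos hk2, h2, hm]
        simp
      · have hkm : PySem.List.pyGetD t 2 0 ≠ (k : Int) := by omega
        simp [hk2, hkm]
    · rw [if_neg hc]
      refine List.map_congr_left ?_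
      intro k hk
      simp only [List.mem_range] at hk
      have hkm : PySem.List.pyGetD t 2 0 ≠ (k : Int) := by omega
      simp [List.filter_append, hkm]

theorem pv_main (node_machine : List (List Int)) (machine_num : Int) :
    convert_jsp_result_to_edges node_machine machine_num
    = convert_jsp_result_to_edges_alt node_machine machine_num := by
  by_cases hmn : machine_num ≤ 0
  · rw [convert_jsp_result_to_edges, convert_jsp_result_to_edges_alt,
        PySem.List.pyRange_one_eq_nil hmn, if_pos hmn]
    rfl
  · rw [convert_jsp_result_to_edges, convert_jsp_result_to_edges_alt, if_neg hmn]
    have hstep : ∀ (acc : List (Int × Int × Int)) (j : Int),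
        (fun all_machine_edge j =>
          let machine_edge := node_machine.filter (fun tasks => PySem.List.pyGetD tasks 2 0 == j)
          let machine_edge := PySem.List.sorted machine_edge (fun x => PySem.List.pyGetD x 3 0) false
          (PySem.List.pyRange 0 ((machine_edge.length : Int) - 1) 1).foldl (fun acc ith =>
            acc ++ [(PySem.List.pyGetD (PySem.List.pyGetD machine_edge ith []) 0 0,
                     PySem.List.pyGetD (PySem.List.pyGetD machine_edge (ith + 1) []) 0 0,
                     PySem.List.pyGetD (PySem.List.pyGetD machine_edge ith []) 1 0)]) all_machine_edge) acc j
        = acc ++ (fun j : Int =>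
            (fun sb : List (List Int) => (sb.zip sb.tail).map (fun uv =>
              (PySem.List.pyGetD uv.1 0 0, PySem.List.pyGetD uv.2 0 0, PySem.List.pyGetD uv.1 1 0)))
            (PySem.List.sorted (node_machine.filter (fun tasks => PySem.List.pyGetD tasks 2 0 == j))
              (fun x => PySem.List.pyGetD x 3 0) false)) j := by
      intro acc j
      simp only []
      rw [PySem.List.foldl_append_singleton_eq_map, pv_block_eq]
    rw [funext (fun acc => funext (fun j => hstep acc j)),
        PySem.List.foldl_append_eq_flatMap, pv_buckets_eq]
    have hstep2 : ∀ (edges : List (Int × Int × Int)) (b : List (List Int)),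
        (fun edges b =>
          let sb := PySem.List.sorted b (fun x => PySem.List.pyGetD x 3 0) false
          edges ++ (sb.zip sb.tail).map (fun uv =>
            (PySem.List.pyGetD uv.1 0 0, PySem.List.pyGetD uv.2 0 0, PySem.List.pyGetD uv.1 1 0))) edges b
        = edges ++ (fun b : List (List Int) =>
            (fun sb : List (List Int) => (sb.zip sb.tail).map (fun uv =>
              (PySem.List.pyGetD uv.1 0 0, PySem.List.pyGetD uv.2 0 0, PySem.List.pyGetD uv.1 1 0)))
            (PySem.List.sorted b (fun x => PySem.List.pyGetD x 3 0) false)) b := by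
      intro edges b
      rfl
    rw [funext (fun e => funext (fun b => hstep2 e b)),
        PySem.List.foldl_append_eq_flatMap, List.flatMap_map]
    rw [PySem.List.pyRange_one]
    rw [List.flatMap_map]
    simp only [zero_add, sub_zero]

-- ===== VERDICT (by name: the statement is the Claim_ definition above) =====
theorem convert_jsp_result_to_edges_spec : Claim_equal_convert_jsp_result_to_edges := by
  intro node_machine machine_num _ _
  unfold Spec_convert_jsp_result_to_edges
  exact pv_main node_machine machine_num
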